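-- pv_equiv track=rewrite | github.com/samsadlonka/hakathon_yandexlyceum_procion5 | tactics_1.py | give_area_without_enemy
-- ===== SOURCE A (Python) =====
-- def give_num_from_str(coor: str) -> list:
--     return list(map(lambda x: int(x), coor.split('/')))
--
-- def give_area_without_enemy(goal, enemy_ships):
--     """Определяет область, в которой меньше всего противников"""
--     area = []
--     for index, coordinate in enumerate(goal):
--         less_coordinate, more_coordinate = 0, 0
--         for ship in enemy_ships:
--             ship_format_num = give_num_from_str(ship['Position'])
--             if ship_format_num[index] < coordinate:
--                 less_coordinate += 1
--             else:
--                 more_coordinate += 1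
--         if less_coordinate < more_coordinate and coordinate > 3:
--             area.append((-1, coordinate))
--         else:
--             area.append((coordinate, 30))
--     return area
-- ===== SOURCE B (Python) =====
-- def give_num_from_str(coor: str) -> list:
--     return list(map(lambda x: int(x), coor.split('/')))
--
-- def give_area_without_enemy(goal, enemy_ships):
--     """One pass over the ships: parse each Position once and count, per dimension,
--     how many enemy coordinates lie below the goal's; then decide each dimension
--     with the closed comparison 2*less < total."""
--     if not goal:
--         return []
--     less = [0] * len(goal)
--     for ship in enemy_ships:
--         pos = give_num_from_str(ship['Position'])
--         less = [l + (p < c) for l, p, c in zip(less, pos, goal)]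
--     n = len(enemy_ships)
--     return [(-1, c) if 2 * l < n and c > 3 else (c, 30)
--             for l, c in zip(less, goal)]
-- ===== Notes on version B (the rewrite author's own statement) =====
-- stated objective: alternative
-- what changed: B makes a single pass over the ships, parsing each Position once and accumulating a per-dimension below-count table, then decides each dimension by the closed comparison 2*less < total, instead of A's dimension-outer loop that re-parses every ship's Position for every dimension.
import Mathlib
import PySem

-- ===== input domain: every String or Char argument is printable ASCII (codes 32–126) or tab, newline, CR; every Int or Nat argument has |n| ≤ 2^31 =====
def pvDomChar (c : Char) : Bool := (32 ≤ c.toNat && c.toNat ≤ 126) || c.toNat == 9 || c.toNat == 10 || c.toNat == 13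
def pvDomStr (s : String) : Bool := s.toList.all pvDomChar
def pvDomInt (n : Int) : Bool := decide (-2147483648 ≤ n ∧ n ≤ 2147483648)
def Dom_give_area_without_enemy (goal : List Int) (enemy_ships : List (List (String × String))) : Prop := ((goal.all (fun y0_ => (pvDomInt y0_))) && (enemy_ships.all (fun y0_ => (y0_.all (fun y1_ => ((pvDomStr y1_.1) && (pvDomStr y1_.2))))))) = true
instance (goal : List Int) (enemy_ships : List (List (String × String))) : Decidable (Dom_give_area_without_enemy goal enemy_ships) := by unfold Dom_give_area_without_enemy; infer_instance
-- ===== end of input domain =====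

-- B replaces A's dimension-outer loop (which re-parses every ship's Position for every
-- dimension) by one pass over the ships accumulating a per-dimension below-count table,
-- then decides each dimension by the closed comparison 2*less < total (objective: alternative;
-- it avoids the repeated parsing, though no speedup was measured).

-- ===== PORT A =====
-- int(x): PySem.Int.ofStr? is none exactly where Python raises ValueError; Pre_ excludes
-- those inputs, so the .getD 0 default is never observed on the claimed domain.
def give_num_from_str (coor : String) : List Int :=
  ((PySem.Str.split? coor "/").getD []).map (fun x => (PySem.Int.ofStr? x).getD 0)

-- ship['Position']: first-match association-list lookup; KeyError (none) is excluded by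
-- Pre_, as is the IndexError case of ship_format_num[index] (pyGet? = none).
def give_area_without_enemy (goal : List Int) (enemy_ships : List (List (String × String))) : List (Int × Int) :=
  (PySem.List.enumerate goal).foldl (fun area ic =>
    let lm : Int × Int := enemy_ships.foldl (fun lm ship =>
      let num := give_num_from_str ((List.lookup "Position" ship).getD "")
      if (PySem.List.pyGet? num ic.1).getD 0 < ic.2 then (lm.1 + 1, lm.2) else (lm.1, lm.2 + 1))
      (0, 0)
    if lm.1 < lm.2 ∧ ic.2 > 3 then area ++ [(-1, ic.2)] else area ++ [(ic.2, 30)]) []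

-- ===== PORT B =====
def give_area_without_enemy_alt (goal : List Int) (enemy_ships : List (List (String × String))) : List (Int × Int) :=
  if goal = [] then []
  else
    let less := enemy_ships.foldl (fun less ship =>
      let pos := give_num_from_str ((List.lookup "Position" ship).getD "")
      (less.zip (pos.zip goal)).map (fun t => t.1 + if t.2.1 < t.2.2 then 1 else 0))
      (List.replicate goal.length (0 : Int))
    let n : Int := enemy_ships.length
    (less.zip goal).map (fun t => if 2 * t.1 < n ∧ t.2 > 3 then (-1, t.2) else (t.2, 30))

-- ===== PRECONDITION & SPEC =====
-- A raises unless goal is empty (then the loop body never runs) or every ship has a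
-- 'Position' whose '/'-separated parts all parse as ints and are at least as many as
-- the goal's dimensions; Pre_ admits exactly the inputs where A returns normally.
def shipOK (n : Nat) (ship : List (String × String)) : Bool :=
  match List.lookup "Position" ship with
  | none => false
  | some s => ((PySem.Str.split? s "/").getD []).all (fun x => (PySem.Int.ofStr? x).isSome) &&
      n ≤ ((PySem.Str.split? s "/").getD []).length

def Pre_give_area_without_enemy (goal : List Int) (enemy_ships : List (List (String × String))) : Prop :=
  goal = [] ∨ enemy_ships.all (shipOK goal.length) = true
instance (goal : List Int) (enemy_ships : List (List (String × String))) : Decidable (Pre_give_area_without_enemy goal enemy_ships) := by unfold Pre_give_area_without_enemy; infer_instance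

def pvWitness_give_area_without_enemy : List Int × (List (List (String × String))) :=
  ([5, 2], [[("Position", "7/1")], [("Position", "3/9/4")]])

def Spec_give_area_without_enemy (goal : List Int) (enemy_ships : List (List (String × String))) (out : List (Int × Int)) : Prop := out = give_area_without_enemy_alt goal enemy_ships
instance (goal : List Int) (enemy_ships : List (List (String × String))) (out : List (Int × Int)) : Decidable (Spec_give_area_without_enemy goal enemy_ships out) := by unfold Spec_give_area_without_enemy; infer_instance

-- ===== CLAIM (what is proved, stated in full; the proofs are below) =====
def Claim_equal_give_area_without_enemy : Prop := ∀ (goal : List Int) (enemy_ships : List (List (String × String))), Dom_give_area_without_enemy goal enemy_ships → Pre_give_area_without_enemy goal enemy_ships → Spec_give_area_without_enemy goal enemy_ships (give_area_without_enemy goal enemy_ships)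

-- ===== LEMMAS AND PROOFS =====

-- the coordinate of `ship` at dimension i, as both ports read it
def coordAt (ship : List (String × String)) (i : Int) : Int :=
  (PySem.List.pyGet? (give_num_from_str ((List.lookup "Position" ship).getD "")) i).getD 0

def belowP (i c : Int) (ship : List (String × String)) : Bool := decide (coordAt ship i < c)

-- A's inner loop counts the ships below / not below the goal coordinate
lemma inner_fold_eq (i c : Int) (ships : List (List (String × String))) (a b : Int) :
    ships.foldl (fun lm ship =>
      let num := give_num_from_str ((List.lookup "Position" ship).getD "")
      if (PySem.List.pyGet? num i).getD 0 < c then (lm.1 + 1, lm.2) else (lm.1, lm.2 + 1))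
      (a, b)
    = (a + (ships.countP (belowP i c) : Int),
       b + (ships.countP (fun s => !(belowP i c s)) : Int)) := by
  induction ships generalizing a b with
  | nil => simp
  | cons x xs ih =>
    simp only [List.foldl_cons, List.countP_cons]
    by_cases h : coordAt x i < c
    · simp only [coordAt] at h
      rw [if_pos h, ih]
      have hb : belowP i c x = true := by simp [belowP, coordAt, h]
      simp [hb]
      omega
    · simp only [coordAt] at h
      rw [if_neg h, ih]
      have hb : belowP i c x = false := by simp [belowP, coordAt, h]
      simp [hb]
      omega

lemma portA_eq_map (goal : List Int) (ships : List (List (String × String))) :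
    give_area_without_enemy goal ships
    = (PySem.List.enumerate goal).map (fun ic =>
        if ((ships.countP (belowP ic.1 ic.2) : Int) < (ships.countP (fun s => !(belowP ic.1 ic.2 s)) : Int) ∧ ic.2 > 3)
        then (-1, ic.2) else (ic.2, 30)) := by
  unfold give_area_without_enemy
  rw [show (fun (area : List (Int × Int)) (ic : Int × Int) =>
      let lm : Int × Int := ships.foldl (fun lm ship =>
        let num := give_num_from_str ((List.lookup "Position" ship).getD "")
        if (PySem.List.pyGet? num ic.1).getD 0 < ic.2 then (lm.1 + 1, lm.2) else (lm.1, lm.2 + 1))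
        (0, 0)
      if lm.1 < lm.2 ∧ ic.2 > 3 then area ++ [(-1, ic.2)] else area ++ [(ic.2, 30)])
    = (fun area ic => area ++ [if ((ships.countP (belowP ic.1 ic.2) : Int) < (ships.countP (fun s => !(belowP ic.1 ic.2 s)) : Int) ∧ ic.2 > 3) then (-1, ic.2) else (ic.2, 30)]) from ?_]
  · rw [PySem.List.foldl_append_singleton_eq_map]
    simp
  · funext area ic
    rw [inner_fold_eq ic.1 ic.2 ships 0 0]
    simp only [zero_add]
    split_ifs <;> rfl

-- counting is what B's zip/map step accumulates
lemma step_eq (goal : List Int) (h : Int × Int → Int) (ship : List (String × String))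
    (hlen : goal.length ≤ (give_num_from_str ((List.lookup "Position" ship).getD "")).length) :
    (((PySem.List.enumerate goal).map h).zip
        ((give_num_from_str ((List.lookup "Position" ship).getD "")).zip goal)).map
      (fun t => t.1 + if t.2.1 < t.2.2 then 1 else 0)
    = (PySem.List.enumerate goal).map (fun ic => h ic + if belowP ic.1 ic.2 ship then 1 else 0) := by
  apply List.ext_getElem
  · simp [PySem.List.length_enumerate]; omega
  · intro k h1 h2
    have hk : k < goal.length := by
      simp [PySem.List.length_enumerate] at h2; exact h2
    have hkp : k < (give_num_from_str ((List.lookup "Position" ship).getD "")).length := by omega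
    simp only [List.getElem_map, List.getElem_zip, PySem.List.getElem_enumerate]
    have : (PySem.List.pyGet? (give_num_from_str ((List.lookup "Position" ship).getD ""))
        ((0:Int) + (k:Int))).getD 0
        = (give_num_from_str ((List.lookup "Position" ship).getD ""))[k] := by
      rw [show (0:Int) + (k:Int) = ((k:Nat):Int) by omega, PySem.List.pyGet?_natCast]
      simp [List.getElem?_eq_getElem hkp]
    simp [belowP, coordAt, List.getElem?_eq_getElem hkp]

lemma fold_counts (goal : List Int) (ships : List (List (String × String)))
    (hOK : ∀ ship ∈ ships, shipOK goal.length ship = true) (h : Int × Int → Int) :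
    ships.foldl (fun less ship =>
      let pos := give_num_from_str ((List.lookup "Position" ship).getD "")
      (less.zip (pos.zip goal)).map (fun t => t.1 + if t.2.1 < t.2.2 then 1 else 0))
      ((PySem.List.enumerate goal).map h)
    = (PySem.List.enumerate goal).map (fun ic => h ic + (ships.countP (belowP ic.1 ic.2) : Int)) := by
  induction ships generalizing h with
  | nil => simp
  | cons x xs ih =>
    have hxOK := hOK x (by simp)
    have hlen : goal.length ≤ (give_num_from_str ((List.lookup "Position" x).getD "")).length := by
      unfold shipOK at hxOK
      unfold give_num_from_str
      cases hl : List.lookup "Position" x with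
      | none => rw [hl] at hxOK; simp at hxOK
      | some s => rw [hl] at hxOK; simp at hxOK ⊢; omega
    simp only [List.foldl_cons]
    rw [step_eq goal h x hlen, ih (fun ship hm => hOK ship (by simp [hm]))]
    apply List.map_congr_left
    intro ic _
    simp only [List.countP_cons]
    by_cases hb : belowP ic.1 ic.2 x = true <;> simp [hb] <;> push_cast <;> ring

lemma portB_eq_map (goal : List Int) (ships : List (List (String × String)))
    (hne : goal ≠ []) (hOK : ∀ ship ∈ ships, shipOK goal.length ship = true) :
    give_area_without_enemy_alt goal ships
    = (PySem.List.enumerate goal).map (fun ic =>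
        if (2 * (ships.countP (belowP ic.1 ic.2) : Int) < (ships.length : Int) ∧ ic.2 > 3)
        then (-1, ic.2) else (ic.2, 30)) := by
  unfold give_area_without_enemy_alt
  rw [if_neg hne]
  have hrep : List.replicate goal.length (0 : Int) = (PySem.List.enumerate goal).map (fun _ => 0) := by
    apply List.ext_getElem <;> simp [PySem.List.length_enumerate]
  rw [hrep, fold_counts goal ships hOK (fun _ => 0)]
  apply List.ext_getElem
  · simp [PySem.List.length_enumerate]
  · intro k h1 h2
    have hk : k < goal.length := by
      simp [PySem.List.length_enumerate] at h2; exact h2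
    simp [PySem.List.getElem_enumerate, List.getElem_zip]

-- the two per-dimension conditions agree: less < more ↔ 2*less < total
lemma conds_agree (ships : List (List (String × String))) (i c : Int) :
    (((ships.countP (belowP i c) : Int) < (ships.countP (fun s => !(belowP i c s)) : Int)) ↔
      (2 * (ships.countP (belowP i c) : Int) < (ships.length : Int))) := by
  have h2 : ships.countP (belowP i c) + ships.countP (fun s => !belowP i c s) = ships.length := by
    have h3 : (fun s => !belowP i c s) = (fun a => decide ¬ belowP i c a = true) := by
      funext a; cases belowP i c a <;> simp
    rw [h3, ← List.length_eq_countP_add_countP]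
  omega

-- ===== VERDICT (by name: the statement is the Claim_ definition above) =====
theorem give_area_without_enemy_spec : Claim_equal_give_area_without_enemy := by
  intro goal ships _ hpre
  unfold Spec_give_area_without_enemy
  rcases hpre with h | h
  · subst h
    simp [give_area_without_enemy_alt, give_area_without_enemy, PySem.List.enumerate]
  · by_cases hne : goal = []
    · subst hne
      simp [give_area_without_enemy_alt, give_area_without_enemy, PySem.List.enumerate]
    · rw [portA_eq_map, portB_eq_map goal ships hne (by simpa [List.all_eq_true] using h)]
      apply List.map_congr_left
      intro ic _
      have hca := conds_agree ships ic.1 ic.2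
      simp only [and_congr_left' hca]
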